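-- pv_equiv track=rewrite | github.com/dmitryzykovArtis/education | 23.py | kuz_one_two_multi_three_price_prev
-- ===== SOURCE A (Python) =====
-- def kuz_one_two_multi_three_price_prev(n):
--     """Задача нахождения минимальной стоимости маршрута при шагах +1, +2, *3,
--     с выводом маршрута
--     """
--     prev = [0] * (n + 1)
--     price = [1] * (n + 1)
--     MAX_PRICE = 9999
--     K = [0] * (n + 1)
--     K[0] = MAX_PRICE
--     K[1] = 0
--     K[2] = 1
--     for i in range(2, n + 1):
--         multi = K[i // 3] if i % 3 == 0 else MAX_PRICE
--         if K[i - 1] < K[i - 2] and K[i - 1] < multi: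
--             min = K[i - 1]
--             prev[i] = i - 1
--         elif K[i - 2] < K[i - 1] and K[i - 2] < multi:
--             min = K[i - 2]
--             prev[i] = i - 2
--         else:
--             min = multi
--             prev[i] = i // 3
--         K[i] = min + price[i]
--     i = n
--     s = str(n)
--     while i != 1:
--         s = str(prev[i]) + " " +  s
--         i = prev[i]
--     s += " min: " + str(K[n])
--     return s
-- ===== SOURCE B (Python) =====
-- def kuz_one_two_multi_three_price_prev(n):
--     MAX_PRICE = 9999
--     K = [MAX_PRICE, 0]
--     route = ["", "1"]
--     for i in range(2, n + 1):
--         multi = K[i // 3] if i % 3 == 0 else MAX_PRICE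
--         if K[i - 1] < K[i - 2] and K[i - 1] < multi:
--             best, via = K[i - 1], i - 1
--         elif K[i - 2] < K[i - 1] and K[i - 2] < multi:
--             best, via = K[i - 2], i - 2
--         else:
--             best, via = multi, i // 3
--         K.append(best + 1)
--         route.append(route[via] + " " + str(i))
--     return route[n] + " min: " + str(K[n])
-- ===== Notes on version B (the rewrite author's own statement) =====
-- stated objective: simpler
-- what changed: B removes A's predecessor array and the whole backward reconstruction loop: the single forward pass tabulates the complete route string for every node (route[i] = route[via] + ' ' + str(i)), so the answer is read off directly as route[n], trading O(n) extra string storage for no backtracking pass.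
import Mathlib
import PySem

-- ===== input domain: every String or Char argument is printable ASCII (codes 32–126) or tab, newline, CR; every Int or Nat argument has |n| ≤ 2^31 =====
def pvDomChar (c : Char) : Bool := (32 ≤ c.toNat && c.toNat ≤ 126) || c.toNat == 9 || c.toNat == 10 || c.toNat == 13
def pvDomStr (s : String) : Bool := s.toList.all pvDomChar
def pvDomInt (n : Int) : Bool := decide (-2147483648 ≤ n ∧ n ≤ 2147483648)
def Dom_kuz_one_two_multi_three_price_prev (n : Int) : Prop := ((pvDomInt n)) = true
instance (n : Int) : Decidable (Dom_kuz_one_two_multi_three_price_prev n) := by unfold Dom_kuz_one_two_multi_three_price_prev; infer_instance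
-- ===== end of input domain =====

-- B drops A's predecessor array and backward reconstruction loop: the forward pass tabulates
-- the full route string per node, and the answer is read off directly (objective: simpler).

-- ===== PORT A =====
-- Nat indexing through n.toNat and a fuel bound on the while loop: exact for n ≥ 2 (Pre_),
-- which is exactly where the Python returns (it raises IndexError for every n < 2).
def kuzAStep (price : List Int) (st : List Int × List Int) (i : Nat) : List Int × List Int :=
  let K := st.1
  let prev := st.2
  let multi : Int := if i % 3 = 0 then K.getD (i / 3) 0 else 9999
  if K.getD (i-1) 0 < K.getD (i-2) 0 ∧ K.getD (i-1) 0 < multi then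
    (K.set i (K.getD (i-1) 0 + price.getD i 0), prev.set i (Int.ofNat (i-1)))
  else if K.getD (i-2) 0 < K.getD (i-1) 0 ∧ K.getD (i-2) 0 < multi then
    (K.set i (K.getD (i-2) 0 + price.getD i 0), prev.set i (Int.ofNat (i-2)))
  else
    (K.set i (multi + price.getD i 0), prev.set i (Int.ofNat (i / 3)))

def kuzAFold (m : Nat) : List Int × List Int :=
  (List.range' 2 (m-1)).foldl (kuzAStep (List.replicate (m+1) 1))
    ((((List.replicate (m+1) (0:Int)).set 0 9999).set 1 0).set 2 1, List.replicate (m+1) 0)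

def kuzAWhile (prev : List Int) : Nat → Nat → String → String
  | 0, _, s => s
  | fuel+1, i, s =>
    if i = 1 then s
    else kuzAWhile prev fuel (prev.getD i 0).toNat (PySem.Int.toStr (prev.getD i 0) ++ " " ++ s)

def kuz_one_two_multi_three_price_prev (n : Int) : String :=
  kuzAWhile (kuzAFold n.toNat).2 (n.toNat+1) n.toNat (PySem.Int.toStr n)
    ++ " min: " ++ PySem.Int.toStr ((kuzAFold n.toNat).1.getD n.toNat 0)

-- ===== PORT B =====
-- Source B's loop body: append the chosen cost and the full route string for node i
def kuzBStep (st : List Int × List String) (i : Nat) : List Int × List String :=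
  let K := st.1
  let route := st.2
  let multi : Int := if i % 3 = 0 then K.getD (i / 3) 0 else 9999
  let bv : Int × Nat :=
    if K.getD (i-1) 0 < K.getD (i-2) 0 ∧ K.getD (i-1) 0 < multi then (K.getD (i-1) 0, i-1)
    else if K.getD (i-2) 0 < K.getD (i-1) 0 ∧ K.getD (i-2) 0 < multi then (K.getD (i-2) 0, i-2)
    else (multi, i / 3)
  (K ++ [bv.1 + 1], route ++ [route.getD bv.2 "" ++ " " ++ PySem.Int.toStr (Int.ofNat i)])

def kuzBFold (m : Nat) : List Int × List String :=
  (List.range' 2 (m-1)).foldl kuzBStep ([9999, 0], ["", "1"])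

def kuz_one_two_multi_three_price_prev_alt (n : Int) : String :=
  (kuzBFold n.toNat).2.getD n.toNat "" ++ " min: "
    ++ PySem.Int.toStr ((kuzBFold n.toNat).1.getD n.toNat 0)

-- ===== PRECONDITION & SPEC =====
-- Python A raises IndexError for every n < 2 (K[1]=0 or K[2]=1 out of range), so Pre_ is n ≥ 2.
def Pre_kuz_one_two_multi_three_price_prev (n : Int) : Prop := 2 ≤ n
instance (n : Int) : Decidable (Pre_kuz_one_two_multi_three_price_prev n) := by unfold Pre_kuz_one_two_multi_three_price_prev; infer_instance
def pvWitness_kuz_one_two_multi_three_price_prev : Int := 5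

def Spec_kuz_one_two_multi_three_price_prev (n : Int) (out : String) : Prop := out = kuz_one_two_multi_three_price_prev_alt n
instance (n : Int) (out : String) : Decidable (Spec_kuz_one_two_multi_three_price_prev n out) := by unfold Spec_kuz_one_two_multi_three_price_prev; infer_instance

-- ===== CLAIM (what is proved, stated in full; the proofs are below) =====
def Claim_equal_kuz_one_two_multi_three_price_prev : Prop := ∀ (n : Int), Dom_kuz_one_two_multi_three_price_prev n → Pre_kuz_one_two_multi_three_price_prev n → Spec_kuz_one_two_multi_three_price_prev n (kuz_one_two_multi_three_price_prev n)

-- ===== LEMMAS AND PROOFS =====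

-- the common cost function K[i] of both programs
def Kval : Nat → Int
  | 0 => 9999
  | 1 => 0
  | (i+2) =>
    (if Kval (i+1) < Kval i ∧ Kval (i+1) < (if (i+2) % 3 = 0 then Kval ((i+2)/3) else 9999) then Kval (i+1)
     else if Kval i < Kval (i+1) ∧ Kval i < (if (i+2) % 3 = 0 then Kval ((i+2)/3) else 9999) then Kval i
     else (if (i+2) % 3 = 0 then Kval ((i+2)/3) else 9999)) + 1
termination_by i => i
decreasing_by all_goals omega

-- the common predecessor function
def predN (i : Nat) : Nat :=
  if Kval (i-1) < Kval (i-2) ∧ Kval (i-1) < (if i % 3 = 0 then Kval (i/3) else 9999) then i-1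
  else if Kval (i-2) < Kval (i-1) ∧ Kval (i-2) < (if i % 3 = 0 then Kval (i/3) else 9999) then i-2
  else i/3

theorem Kval_zero : Kval 0 = 9999 := by simp [Kval]
theorem Kval_one : Kval 1 = 0 := by simp [Kval]

theorem Kval_eq (i : Nat) (h : 2 ≤ i) :
    Kval i =
      (if Kval (i-1) < Kval (i-2) ∧ Kval (i-1) < (if i % 3 = 0 then Kval (i/3) else 9999) then Kval (i-1)
       else if Kval (i-2) < Kval (i-1) ∧ Kval (i-2) < (if i % 3 = 0 then Kval (i/3) else 9999) then Kval (i-2)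
       else (if i % 3 = 0 then Kval (i/3) else 9999)) + 1 := by
  obtain ⟨j, rfl⟩ : ∃ j, i = j + 2 := ⟨i - 2, by omega⟩
  simp only [Kval]
  norm_num

theorem getD_map_range' {α : Type} (d : α) (f : Nat → α) (k i : Nat) (h : i < k) :
    ((List.range k).map f).getD i d = f i := by
  rw [List.getD_eq_getElem _ _ (by simpa using h)]
  simp

theorem predN_bounds (i : Nat) (h : 2 ≤ i) : 1 ≤ predN i ∧ predN i < i := by
  unfold predN
  rcases Nat.lt_or_ge i 3 with h3 | h3
  · have hi : i = 2 := by omega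
    subst hi
    simp [Kval_zero, Kval_one]
  · split_ifs <;> omega

theorem Kval_two : Kval 2 = 1 := by
  rw [Kval_eq 2 (by norm_num)]
  norm_num [Kval_zero, Kval_one]

theorem predN_two : predN 2 = 1 := by
  unfold predN
  norm_num [Kval_zero, Kval_one]

-- the route string of node i, as a function of the predecessor chain
def routeStr (i : Nat) : String :=
  if _h : i ≤ 1 then "1"
  else routeStr (predN i) ++ " " ++ PySem.Int.toStr (Int.ofNat i)
termination_by i
decreasing_by exact (predN_bounds i (by omega)).2

theorem routeStr_one : routeStr 1 = "1" := by simp [routeStr]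

theorem routeStr_eq (i : Nat) (h : 2 ≤ i) :
    routeStr i = routeStr (predN i) ++ " " ++ PySem.Int.toStr (Int.ofNat i) := by
  rw [routeStr]
  simp [Nat.not_le.mpr (by omega : 1 < i)]

-- route[0] placeholder of Source B
def routeStr0 (i : Nat) : String := if i = 0 then "" else routeStr i

-- B's step on the tables of Kval / routeStr0 values extends them by one entry
theorem kuzBStep_eq (j : Nat) (hj : 1 ≤ j) :
    kuzBStep ((List.range (j+1)).map Kval, (List.range (j+1)).map routeStr0) (j+1)
      = ((List.range (j+2)).map Kval, (List.range (j+2)).map routeStr0) := by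
  have g1 : ((List.range (j+1)).map Kval).getD (j+1-1) 0 = Kval (j+1-1) :=
    getD_map_range' _ _ _ _ (by omega)
  have g2 : ((List.range (j+1)).map Kval).getD (j+1-2) 0 = Kval (j+1-2) :=
    getD_map_range' _ _ _ _ (by omega)
  have g3 : ((List.range (j+1)).map Kval).getD ((j+1)/3) 0 = Kval ((j+1)/3) :=
    getD_map_range' _ _ _ _ (by omega)
  have hpb := predN_bounds (j+1) (by omega)
  have gr : ((List.range (j+1)).map routeStr0).getD (predN (j+1)) "" = routeStr (predN (j+1)) := by
    rw [getD_map_range' _ _ _ _ (by omega)]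
    unfold routeStr0
    rw [if_neg (by omega)]
  have hbv :
      (if ((List.range (j+1)).map Kval).getD (j+1-1) 0 < ((List.range (j+1)).map Kval).getD (j+1-2) 0
            ∧ ((List.range (j+1)).map Kval).getD (j+1-1) 0
              < (if (j+1) % 3 = 0 then ((List.range (j+1)).map Kval).getD ((j+1)/3) 0 else 9999)
        then (((List.range (j+1)).map Kval).getD (j+1-1) 0, j+1-1)
        else if ((List.range (j+1)).map Kval).getD (j+1-2) 0 < ((List.range (j+1)).map Kval).getD (j+1-1) 0
            ∧ ((List.range (j+1)).map Kval).getD (j+1-2) 0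
              < (if (j+1) % 3 = 0 then ((List.range (j+1)).map Kval).getD ((j+1)/3) 0 else 9999)
        then (((List.range (j+1)).map Kval).getD (j+1-2) 0, j+1-2)
        else ((if (j+1) % 3 = 0 then ((List.range (j+1)).map Kval).getD ((j+1)/3) 0 else 9999), (j+1)/3))
      = (Kval (j+1) - 1, predN (j+1)) := by
    simp only [g1, g2, g3]
    rw [Kval_eq (j+1) (by omega)]
    unfold predN
    split_ifs <;> simp_all
  unfold kuzBStep
  simp only [hbv, Prod.mk.injEq]
  refine ⟨?_, ?_⟩
  · have hk : Kval (j+1) - 1 + 1 = Kval (j+1) := by omega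
    rw [hk]
    conv_rhs => rw [show j+2 = (j+1)+1 from rfl, List.range_succ, List.map_append,
      List.map_cons, List.map_nil]
  · have hr0 : routeStr0 (j+1) = routeStr (predN (j+1)) ++ " " ++ PySem.Int.toStr (Int.ofNat (j+1)) := by
      unfold routeStr0
      rw [if_neg (by omega), routeStr_eq (j+1) (by omega)]
    rw [gr]
    conv_rhs => rw [show j+2 = (j+1)+1 from rfl, List.range_succ, List.map_append,
      List.map_cons, List.map_nil, hr0]

-- B's forward pass builds exactly the tables of Kval / routeStr0 values
theorem kuzBFold_eq (m : Nat) (hm : 1 ≤ m) :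
    kuzBFold m = ((List.range (m+1)).map Kval, (List.range (m+1)).map routeStr0) := by
  induction m with
  | zero => omega
  | succ m ih =>
    rcases Nat.lt_or_ge m 1 with h1 | h1
    · have : m = 0 := by omega
      subst this
      have : kuzBFold 1 = ([9999, 0], ["", "1"]) := rfl
      rw [this]
      simp only [Prod.mk.injEq]
      refine ⟨?_, ?_⟩
      · simp [List.range_succ, Kval_zero, Kval_one]
      · simp [List.range_succ, routeStr0, routeStr_one]
    · have hr : List.range' 2 (m+1-1) = List.range' 2 (m-1) ++ [m+1] := by
        have : m + 1 - 1 = (m - 1) + 1 := by omega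
        rw [this, List.range'_concat]
        congr 2
        omega
      have step : kuzBFold (m+1) = kuzBStep (kuzBFold m) (m+1) := by
        unfold kuzBFold
        rw [hr, List.foldl_append]
        rfl
      rw [step, ih h1, kuzBStep_eq m h1]

-- invariant of A's forward fold (cost table = Kval values, prev table = predN values)
theorem getD_append_left' (l1 l2 : List Int) (i : Nat) (h : i < l1.length) :
    (l1 ++ l2).getD i 0 = l1.getD i 0 := by
  simp [List.getD, List.getElem?_append_left h]

theorem getD_replicate' (k i : Nat) (a : Int) (h : i < k) :
    (List.replicate k a).getD i 0 = a := by
  rw [List.getD_eq_getElem _ _ (by simpa using h)]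
  simp

theorem kuzAFold_inv (m : Nat) (hm : 2 ≤ m) : ∀ j, 2 ≤ j → j ≤ m →
    ((List.range' 2 (j-1)).foldl (kuzAStep (List.replicate (m+1) 1))
        ((((List.replicate (m+1) (0:Int)).set 0 9999).set 1 0).set 2 1, List.replicate (m+1) 0)).1
      = (List.range (j+1)).map Kval ++ List.replicate (m-j) 0
    ∧ ((List.range' 2 (j-1)).foldl (kuzAStep (List.replicate (m+1) 1))
        ((((List.replicate (m+1) (0:Int)).set 0 9999).set 1 0).set 2 1, List.replicate (m+1) 0)).2.length = m + 1
    ∧ ∀ i, 2 ≤ i → i ≤ j →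
        ((List.range' 2 (j-1)).foldl (kuzAStep (List.replicate (m+1) 1))
            ((((List.replicate (m+1) (0:Int)).set 0 9999).set 1 0).set 2 1, List.replicate (m+1) 0)).2.getD i 0
          = Int.ofNat (predN i) := by
  intro j hj
  induction j, hj using Nat.le_induction with
  | base =>
    intro hjm
    obtain ⟨k, rfl⟩ : ∃ k, m = k + 2 := ⟨m - 2, by omega⟩
    have hz : List.replicate (k+2+1) (0:Int) = 0 :: 0 :: 0 :: List.replicate k 0 := by
      simp [List.replicate_succ]
    have ho : List.replicate (k+2+1) (1:Int) = 1 :: 1 :: 1 :: List.replicate k 1 := by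
      simp [List.replicate_succ]
    simp only [show List.range' 2 (2-1) = [2] from rfl, List.foldl_cons, List.foldl_nil]
    refine ⟨?_, ?_, ?_⟩
    · simp [kuzAStep, hz, ho, List.getD, List.range_succ, Kval_zero, Kval_one, Kval_two]
    · simp [kuzAStep, hz, ho, List.getD]
    · intro i h1 h2
      have : i = 2 := by omega
      subst this
      simp [kuzAStep, hz, ho, List.getD, predN_two]
  | succ j hj ih =>
    intro hjm
    obtain ⟨hK, hlen, hprev⟩ := ih (by omega)
    have hr : List.range' 2 (j+1-1) = List.range' 2 (j-1) ++ [j+1] := by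
      have : j + 1 - 1 = (j - 1) + 1 := by omega
      rw [this, List.range'_concat]
      congr 2
      omega
    rw [hr, List.foldl_append]
    set st := (List.range' 2 (j-1)).foldl (kuzAStep (List.replicate (m+1) 1))
        ((((List.replicate (m+1) (0:Int)).set 0 9999).set 1 0).set 2 1, List.replicate (m+1) 0) with hst
    have hget : ∀ i, i ≤ j → st.1.getD i 0 = Kval i := by
      intro i hij
      rw [hK, getD_append_left' _ _ _ (by simp; omega), getD_map_range' _ _ _ _ (by omega)]
    have hstep : kuzAStep (List.replicate (m+1) 1) st (j+1)
        = (st.1.set (j+1) (Kval (j+1)), st.2.set (j+1) (Int.ofNat (predN (j+1)))) := by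
      have e1 : st.1.getD (j+1-1) 0 = Kval (j+1-1) := hget _ (by omega)
      have e2 : st.1.getD (j+1-2) 0 = Kval (j+1-2) := hget _ (by omega)
      have e3 : st.1.getD ((j+1)/3) 0 = Kval ((j+1)/3) := hget _ (by omega)
      have ep : (List.replicate (m+1) (1:Int)).getD (j+1) 0 = 1 := getD_replicate' _ _ _ (by omega)
      unfold kuzAStep predN
      simp only [e1, e2, e3, ep]
      rw [Kval_eq (j+1) (by omega)]
      split_ifs <;> simp_all
    rw [List.foldl_cons, List.foldl_nil, hstep]
    have hlen1 : st.1.length = m + 1 := by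
      rw [hK]
      simp
      omega
    refine ⟨?_, ?_, ?_⟩
    · show st.1.set (j+1) (Kval (j+1)) = _
      rw [hK, List.set_append]
      have hlt : ¬ (j+1 < ((List.range (j+1)).map Kval).length) := by simp
      rw [if_neg hlt]
      have hrep : List.replicate (m-j) (0:Int) = 0 :: List.replicate (m-(j+1)) 0 := by
        have : m - j = (m - (j+1)) + 1 := by omega
        rw [this, List.replicate_succ]
      rw [hrep]
      have hidx : j + 1 - ((List.range (j+1)).map Kval).length = 0 := by simp
      rw [hidx]
      rw [List.range_succ (n := j+1), List.map_append]
      simp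
    · show (st.2.set (j+1) (Int.ofNat (predN (j+1)))).length = _
      simp [hlen]
    · intro i h1 h2
      show (st.2.set (j+1) (Int.ofNat (predN (j+1)))).getD i 0 = _
      by_cases hij : i = j + 1
      · subst hij
        rw [List.getD_eq_getElem _ _ (by rw [List.length_set]; omega)]
        simp [List.getElem_set_self]
      · have : i ≤ j := by omega
        rw [List.getD_eq_getElem?_getD, List.getElem?_set_ne (by omega),
          ← List.getD_eq_getElem?_getD]
        exact hprev i h1 this

theorem kuzAFold_K (m : Nat) (hm : 2 ≤ m) :
    (kuzAFold m).1 = (List.range (m+1)).map Kval := by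
  have h := kuzAFold_inv m hm m hm le_rfl
  unfold kuzAFold
  rw [h.1]
  simp

theorem kuzAFold_prev (m : Nat) (hm : 2 ≤ m) :
    ∀ i, 2 ≤ i → i ≤ m → (kuzAFold m).2.getD i 0 = Int.ofNat (predN i) := by
  intro i h1 h2
  have h := (kuzAFold_inv m hm m hm le_rfl).2.2 i h1 h2
  unfold kuzAFold
  exact h

-- A's backward pass computes routeStr (prepending along the prev chain)
theorem kuzAWhile_eq (m : Nat) (prevL : List Int)
    (hprev : ∀ i, 2 ≤ i → i ≤ m → prevL.getD i 0 = Int.ofNat (predN i)) :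
    ∀ fuel i rest, 1 ≤ i → i ≤ fuel → i ≤ m →
      kuzAWhile prevL fuel i (PySem.Int.toStr (Int.ofNat i) ++ rest) = routeStr i ++ rest := by
  intro fuel
  induction fuel with
  | zero => intro i rest h1 h2 _; omega
  | succ fuel ih =>
    intro i rest h1 h2 hm
    by_cases hone : i = 1
    · subst hone
      rw [kuzAWhile, if_pos rfl, routeStr_one]
      rfl
    · have h2i : 2 ≤ i := by omega
      have hpb := predN_bounds i h2i
      rw [kuzAWhile, if_neg hone, hprev i h2i hm]
      have hgrp : PySem.Int.toStr (Int.ofNat (predN i)) ++ " " ++ (PySem.Int.toStr (Int.ofNat i) ++ rest)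
          = PySem.Int.toStr (Int.ofNat (predN i)) ++ (" " ++ PySem.Int.toStr (Int.ofNat i) ++ rest) := by
        simp [String.append_assoc]
      rw [hgrp, routeStr_eq i h2i]
      have hih := ih (predN i) (" " ++ PySem.Int.toStr (Int.ofNat i) ++ rest)
        (by omega) (by omega) (by omega)
      exact hih.trans (by simp [String.append_assoc])

-- ===== VERDICT (by name: the statement is the Claim_ definition above) =====
theorem kuz_one_two_multi_three_price_prev_spec : Claim_equal_kuz_one_two_multi_three_price_prev := by
  intro n _ hpre
  unfold Spec_kuz_one_two_multi_three_price_prev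
  unfold Pre_kuz_one_two_multi_three_price_prev at hpre
  have hm : 2 ≤ n.toNat := by omega
  have hn : Int.ofNat n.toNat = n := Int.toNat_of_nonneg (by omega)
  unfold kuz_one_two_multi_three_price_prev kuz_one_two_multi_three_price_prev_alt
  rw [kuzAFold_K n.toNat hm, kuzBFold_eq n.toNat (by omega)]
  have hB2 : ((List.range (n.toNat+1)).map routeStr0).getD n.toNat "" = routeStr n.toNat := by
    rw [getD_map_range' _ _ _ _ (by omega)]
    unfold routeStr0
    rw [if_neg (by omega)]
  have hs : PySem.Int.toStr n = PySem.Int.toStr (Int.ofNat n.toNat) ++ "" := by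
    rw [hn]; simp
  rw [hs, kuzAWhile_eq n.toNat (kuzAFold n.toNat).2 (kuzAFold_prev n.toNat hm)
    (n.toNat+1) n.toNat "" (by omega) (by omega) le_rfl, hB2]
  simp
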